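-- pv_equiv track=rewrite | github.com/tapilab/nocouncil-etl | correction.py | apply_correction_preserving_punctuation
-- ===== SOURCE A (Python) =====
-- def apply_correction_preserving_punctuation(words_list, position, corrected_value):
--     """
--     Apply a word-level correction while preserving trailing punctuation
--     and possessive markers ('s / s').
--     """
--     if position >= len(words_list):
--         return words_list
--
--     original_word = words_list[position]
--
--     # Detect possessive suffix
--     possessive = ""
--     temp_word = original_word
--     if temp_word.endswith("'s") or temp_word.endswith("\u2019s"):
--         possessive = temp_word[-2:]
--         temp_word = temp_word[:-2]
--     elif temp_word.endswith("s'"):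
--         possessive = temp_word[-2:]
--         temp_word = temp_word[:-2]
--
--     # Detect trailing punctuation (after possessive removed)
--     trailing_punct = ""
--     for char in reversed(temp_word):
--         if char in ".,!?;:'\"()[]{}":
--             trailing_punct = char + trailing_punct
--         else:
--             break
--
--     words_list[position] = corrected_value + possessive + trailing_punct
--     return words_list
-- ===== SOURCE B (Python) =====
-- import re
--
-- # One regex does all the work: lazy base, greedy trailing-punctuation run, optional
-- # possessive marker at the very end; re.S so '.' also matches newlines.
-- _TAIL = re.compile(r"(.*?)([.,!?;:'\"()\[\]{}]*)('s|\u2019s|s')?", re.S)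
--
-- def apply_correction_preserving_punctuation(words_list, position, corrected_value):
--     if position >= len(words_list):
--         return words_list
--     m = _TAIL.fullmatch(words_list[position])
--     punct = m.group(2)
--     poss = m.group(3) or ""
--     words_list[position] = corrected_value + poss + punct
--     return words_list
-- ===== Notes on version B (the rewrite author's own statement) =====
-- stated objective: alternative
-- what changed: Replaces A's possessive endswith-branch chain plus explicit reverse-scan punctuation loop with a single regex fullmatch r"(.*?)([.,!?;:'"()\[\]{}]*)('s|’s|s')?" whose lazy base / greedy-with-backtracking punctuation group reproduce A's precedence; ported to Lean as the backtracking matcher this pattern runs.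
import Mathlib
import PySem

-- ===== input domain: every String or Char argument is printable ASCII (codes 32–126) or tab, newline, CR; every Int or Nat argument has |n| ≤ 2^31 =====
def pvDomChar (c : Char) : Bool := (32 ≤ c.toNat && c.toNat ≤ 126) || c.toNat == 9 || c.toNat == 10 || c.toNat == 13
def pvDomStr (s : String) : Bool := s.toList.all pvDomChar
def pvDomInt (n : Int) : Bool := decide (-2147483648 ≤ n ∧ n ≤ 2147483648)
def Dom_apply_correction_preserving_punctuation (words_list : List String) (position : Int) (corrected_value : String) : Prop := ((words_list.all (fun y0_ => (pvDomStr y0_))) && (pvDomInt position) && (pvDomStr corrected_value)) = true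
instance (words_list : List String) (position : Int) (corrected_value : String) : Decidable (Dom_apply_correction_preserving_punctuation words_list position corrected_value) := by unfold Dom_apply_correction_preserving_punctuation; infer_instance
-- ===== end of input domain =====

-- B replaces A's possessive branch chain + reverse punctuation scan by one regex fullmatch
-- r"(.*?)([.,!?;:'\"()\[\]{}]*)('s|’s|s')?" (alternative; same cost). Both Pythons mutate
-- words_list in place; the equivalence proved here is about the return value.

-- ===== PORT A =====
def pvPunct : List Char := ".,!?;:'\"()[]{}".toList

-- A's loop: "for char in reversed(temp_word): if char in PUNCT: trailing_punct = char + trailing_punct else break"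
def pvPunctLoopA : List Char → List Char → List Char
  | [], acc => acc
  | c :: rest, acc => if c ∈ pvPunct then pvPunctLoopA rest (c :: acc) else acc

-- A's per-word body: possessive branch chain, then the reverse scan; returns possessive ++ trailing_punct
def pvSuffixA (ow : List Char) : List Char :=
  let pt : List Char × List Char :=
    if PySem.Chars.endswith ow "'s".toList || PySem.Chars.endswith ow "’s".toList then
      (PySem.List.slice ow (some (-2)) none, PySem.List.slice ow none (some (-2)))
    else if PySem.Chars.endswith ow "s'".toList then
      (PySem.List.slice ow (some (-2)) none, PySem.List.slice ow none (some (-2)))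
    else ([], ow)
  pt.1 ++ pvPunctLoopA pt.2.reverse []

def apply_correction_preserving_punctuation (words_list : List String) (position : Int) (corrected_value : String) : List String :=
  if (words_list.length : Int) ≤ position then words_list
  else
    match PySem.List.pyGet? words_list position with
    | none => words_list  -- Python raises IndexError here; excluded by Pre_
    | some original_word =>
      PySem.List.pySetD words_list position
        (String.ofList (corrected_value.toList ++ pvSuffixA original_word.toList))

-- ===== PORT B =====
-- B calls re.fullmatch with the pattern r"(.*?)([.,!?;:'\"()\[\]{}]*)('s|’s|s')?" (re.S).
-- PySem has no regex, so the re call is ported BY HAND, step for step, as the backtracking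
-- matcher the re engine runs for exactly this pattern (exact on all inputs):
--   group 1 is LAZY: try tails w[i:] for i = 0,1,2,… and keep the first that matches;
--   group 2 is a GREEDY punctuation run: start at the maximal run length k and backtrack
--   j = k, k-1, …, 0 until the optional possessive alternation ('s|’s|s') — or, failing
--   that, the empty string — consumes the rest (fullmatch: nothing may remain).
def pvPossAlts : List (List Char) := ["'s".toList, "’s".toList, "s'".toList]

-- backtracking of the greedy punct group: j = current length of group 2
def pvTryJ (t : List Char) : Nat → Option (List Char × List Char)
  | 0 =>
    if t ∈ pvPossAlts then some ([], t)
    else if t = [] then some ([], [])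
    else none
  | j+1 =>
    if t.drop (j+1) ∈ pvPossAlts then some (t.take (j+1), t.drop (j+1))
    else if t.drop (j+1) = [] then some (t.take (j+1), [])
    else pvTryJ t j

-- match of "punct* poss?" against the WHOLE tail t: (group2, group3)
def pvTailM (t : List Char) : Option (List Char × List Char) :=
  pvTryJ t (t.takeWhile (· ∈ pvPunct)).length

-- lazy group 1: first tail (longest suffix) that matches wins
def pvScan : List Char → List Char × List Char
  | [] => ([], [])
  | c :: rest =>
    match pvTailM (c :: rest) with
    | some r => r
    | none => pvScan rest

def apply_correction_preserving_punctuation_alt (words_list : List String) (position : Int) (corrected_value : String) : List String :=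
  if (words_list.length : Int) ≤ position then words_list
  else
    match PySem.List.pyGet? words_list position with
    | none => words_list
    | some word =>
      let m := pvScan word.toList
      PySem.List.pySetD words_list position
        (String.ofList (corrected_value.toList ++ m.2 ++ m.1))

-- ===== PRECONDITION & SPEC =====
-- Pre_ excludes exactly the inputs where Python A raises IndexError: position < -len(words_list).
def Pre_apply_correction_preserving_punctuation (words_list : List String) (position : Int) (corrected_value : String) : Prop :=
  -(words_list.length : Int) ≤ position
instance (words_list : List String) (position : Int) (corrected_value : String) : Decidable (Pre_apply_correction_preserving_punctuation words_list position corrected_value) := by unfold Pre_apply_correction_preserving_punctuation; infer_instance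

def pvWitness_apply_correction_preserving_punctuation : List String × Int × String := (["dog's,"], 0, "cats")

def Spec_apply_correction_preserving_punctuation (words_list : List String) (position : Int) (corrected_value : String) (out : List String) : Prop := out = apply_correction_preserving_punctuation_alt words_list position corrected_value
instance (words_list : List String) (position : Int) (corrected_value : String) (out : List String) : Decidable (Spec_apply_correction_preserving_punctuation words_list position corrected_value out) := by unfold Spec_apply_correction_preserving_punctuation; infer_instance

-- ===== CLAIM (what is proved, stated in full; the proofs are below) =====
def Claim_equal_apply_correction_preserving_punctuation : Prop := ∀ (words_list : List String) (position : Int) (corrected_value : String), Dom_apply_correction_preserving_punctuation words_list position corrected_value → Pre_apply_correction_preserving_punctuation words_list position corrected_value → Spec_apply_correction_preserving_punctuation words_list position corrected_value (apply_correction_preserving_punctuation words_list position corrected_value)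

-- ===== LEMMAS AND PROOFS =====

-- specification pieces both ports are reduced to
def pvP (c : Char) : Bool := c ∈ pvPunct
def pvSpecPoss (w : List Char) : List Char :=
  if w.drop (w.length - 2) ∈ pvPossAlts then w.drop (w.length - 2) else []
def pvPunctSfx (l : List Char) : List Char := (l.reverse.takeWhile pvP).reverse

theorem pvP_def : (fun x : Char => decide (x ∈ pvPunct)) = pvP := rfl

theorem pvPossAlts_len {p : List Char} (h : p ∈ pvPossAlts) : p.length = 2 := by
  simp only [pvPossAlts, List.mem_cons, List.not_mem_nil, or_false] at h
  rcases h with h | h | h <;> subst h <;> decide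

theorem pvPunctSfx_all {l : List Char} (h : l.all pvP) : pvPunctSfx l = l := by
  unfold pvPunctSfx
  rw [List.takeWhile_eq_self_iff.mpr (fun a ha => List.all_eq_true.mp h a (List.mem_reverse.mp ha)),
    List.reverse_reverse]

theorem pvPunctSfx_tail {l : List Char} (h : ¬ l.all pvP) : pvPunctSfx l = pvPunctSfx l.tail := by
  cases l with
  | nil => simp at h
  | cons x l' =>
    unfold pvPunctSfx
    simp only [List.tail_cons, List.reverse_cons]
    rw [List.takeWhile_append]
    by_cases h' : l'.all pvP
    · have hx : pvP x = false := by
        cases hb : pvP x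
        · rfl
        · exact absurd (by simp [List.all_cons, hb, h']) h
      have htw : l'.reverse.takeWhile pvP = l'.reverse :=
        List.takeWhile_eq_self_iff.mpr (fun a ha => List.all_eq_true.mp h' a (List.mem_reverse.mp ha))
      rw [htw]
      simp [List.takeWhile, hx]
    · have hne : (l'.reverse.takeWhile pvP).length ≠ l'.reverse.length := by
        intro hlen
        exact h' (List.all_eq_true.mpr fun a ha =>
          List.takeWhile_eq_self_iff.mp ((List.takeWhile_prefix _).eq_of_length hlen) a
            (List.mem_reverse.mpr ha))
      rw [if_neg hne]

-- A's scan loop is the punctuation suffix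
theorem pvPunctLoopA_eq (rl acc : List Char) :
    pvPunctLoopA rl acc = (rl.takeWhile (· ∈ pvPunct)).reverse ++ acc := by
  induction rl generalizing acc with
  | nil => simp [pvPunctLoopA]
  | cons c rest ih =>
    by_cases h : c ∈ pvPunct <;> simp [pvPunctLoopA, h, ih]

theorem pvPunctLoopA_sfx (t : List Char) : pvPunctLoopA t.reverse [] = pvPunctSfx t := by
  rw [pvPunctLoopA_eq, List.append_nil]; rfl

-- a length-2 suffix sits exactly at w.drop (w.length - 2)
theorem pv_sfx (p w : List Char) (h : p.length = 2) :
    p <:+ w ↔ (2 ≤ w.length ∧ w.drop (w.length - 2) = p) := by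
  constructor
  · intro hs
    have hl := hs.length_le
    rw [h] at hl
    refine ⟨hl, ?_⟩
    obtain ⟨u, rfl⟩ := hs
    have hu : (u ++ p).length - 2 = u.length := by simp [h]
    rw [hu, List.drop_left]
  · rintro ⟨hl, rfl⟩
    exact List.drop_suffix _ _

-- A's per-word suffix in spec form
theorem pvSuffixA_spec (w : List Char) :
    pvSuffixA w = pvSpecPoss w ++ pvPunctSfx (w.take (w.length - (pvSpecPoss w).length)) := by
  have H1 : (PySem.Chars.endswith w "'s".toList = true) = (2 ≤ w.length ∧ w.drop (w.length - 2) = "'s".toList) := by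
    rw [PySem.Chars.endswith_iff, pv_sfx _ _ (by decide)]
  have H2 : (PySem.Chars.endswith w "’s".toList = true) = (2 ≤ w.length ∧ w.drop (w.length - 2) = "’s".toList) := by
    rw [PySem.Chars.endswith_iff, pv_sfx _ _ (by decide)]
  have H3 : (PySem.Chars.endswith w "s'".toList = true) = (2 ≤ w.length ∧ w.drop (w.length - 2) = "s'".toList) := by
    rw [PySem.Chars.endswith_iff, pv_sfx _ _ (by decide)]
  have sfrom : PySem.List.slice w (some (-2)) none = w.drop (w.length - 2) :=
    PySem.List.slice_from_neg_ofNat w 2 (by omega)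
  have sto : PySem.List.slice w none (some (-2)) = w.take (w.length - 2) :=
    PySem.List.slice_to_neg_ofNat w 2 (by omega)
  have hmem : (w.drop (w.length - 2) ∈ pvPossAlts) ↔
      (w.drop (w.length - 2) = "'s".toList ∨ w.drop (w.length - 2) = "’s".toList ∨ w.drop (w.length - 2) = "s'".toList) := by
    simp [pvPossAlts]
  unfold pvSuffixA pvSpecPoss
  simp only [sfrom, sto, Bool.or_eq_true, H1, H2, H3]
  by_cases hA : 2 ≤ w.length
  · by_cases hm : w.drop (w.length - 2) ∈ pvPossAlts
    · have hlen : (w.drop (w.length - 2)).length = 2 := pvPossAlts_len hm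
      rcases hmem.mp hm with h | h | h
      · rw [if_pos (Or.inl ⟨hA, h⟩), if_pos hm, hlen, pvPunctLoopA_sfx]
      · rw [if_pos (Or.inr ⟨hA, h⟩), if_pos hm, hlen, pvPunctLoopA_sfx]
      · rw [if_neg (by rintro (⟨_, h'⟩ | ⟨_, h'⟩) <;> · rw [h'] at h; exact absurd h (by decide)),
          if_pos ⟨hA, h⟩, if_pos hm, hlen, pvPunctLoopA_sfx]
    · rw [if_neg (by rintro (⟨_, h'⟩ | ⟨_, h'⟩) <;> exact hm (hmem.mpr (by tauto))),
        if_neg (by rintro ⟨_, h'⟩; exact hm (hmem.mpr (by tauto))), if_neg hm]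
      simp [pvPunctLoopA_sfx]
  · have hshort : w.drop (w.length - 2) ∉ pvPossAlts := by
      intro hm
      have := pvPossAlts_len hm
      rw [List.length_drop] at this
      omega
    rw [if_neg (by rintro (⟨h, _⟩ | ⟨h, _⟩) <;> exact hA h),
      if_neg (by rintro ⟨h, _⟩; exact hA h), if_neg hshort]
    simp [pvPunctLoopA_sfx]

-- ----- matcher lemmas -----

theorem pvTryJ_hit {t : List Char} {j : Nat} (h : t.drop j ∈ pvPossAlts) :
    pvTryJ t j = some (t.take j, t.drop j) := by
  cases j with
  | zero => simp only [List.drop_zero] at h ⊢; simp [pvTryJ, h]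
  | succ j => simp [pvTryJ, h]

theorem pvTryJ_nil {t : List Char} {j : Nat} (h : t.drop j = []) :
    pvTryJ t j = some (t.take j, []) := by
  cases j with
  | zero => simp only [List.drop_zero] at h; simp [pvTryJ, h]
  | succ j => simp [pvTryJ, h]

theorem pvTryJ_step {t : List Char} {j : Nat} (h1 : t.drop (j+1) ∉ pvPossAlts)
    (h2 : t.drop (j+1) ≠ []) : pvTryJ t (j+1) = pvTryJ t j := by
  simp [pvTryJ, h1, h2]

-- greedy backtracking from k down to a hit at j
theorem pvTryJ_between {t : List Char} {j : Nat} (hm : t.drop j ∈ pvPossAlts) :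
    ∀ k, j ≤ k → (∀ i, j < i → i ≤ k → t.drop i ∉ pvPossAlts ∧ t.drop i ≠ []) →
    pvTryJ t k = some (t.take j, t.drop j) := by
  intro k
  induction k with
  | zero =>
    intro hk _
    have : j = 0 := Nat.le_zero.mp hk
    subst this
    exact pvTryJ_hit hm
  | succ k ihk =>
    intro hk hbad
    by_cases hj : j = k + 1
    · subst hj; exact pvTryJ_hit hm
    · have h1 := hbad (k+1) (by omega) (le_refl _)
      rw [pvTryJ_step h1.1 h1.2]
      exact ihk (by omega) (fun i hi1 hi2 => hbad i hi1 (by omega))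

theorem pv_take_all {t : List Char} {j : Nat} (hj : j ≤ (t.takeWhile pvP).length) :
    (t.take j).all pvP := by
  obtain ⟨r, hr⟩ := List.takeWhile_prefix (p := pvP) (l := t)
  refine List.all_eq_true.mpr fun a ha => ?_
  rw [← hr, List.take_append_of_le_length hj] at ha
  exact List.mem_takeWhile_imp (List.mem_of_mem_take ha)

-- any success of the backtracking has the matched shape
theorem pvTryJ_succ_shape {t : List Char} {j : Nat} {q p : List Char}
    (hj : j ≤ (t.takeWhile pvP).length) (h : pvTryJ t j = some (q, p)) :
    q.all pvP ∧ q ++ p = t ∧ (p ∈ pvPossAlts ∨ p = []) := by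
  induction j with
  | zero =>
    simp only [pvTryJ] at h
    by_cases hm : t ∈ pvPossAlts
    · rw [if_pos hm] at h
      simp only [Option.some.injEq, Prod.mk.injEq] at h
      obtain ⟨rfl, rfl⟩ := h
      exact ⟨rfl, rfl, Or.inl hm⟩
    · rw [if_neg hm] at h
      by_cases hn : t = []
      · rw [if_pos hn] at h
        simp only [Option.some.injEq, Prod.mk.injEq] at h
        obtain ⟨rfl, rfl⟩ := h
        exact ⟨rfl, by simp [hn], Or.inr rfl⟩
      · rw [if_neg hn] at h; cases h
  | succ j ih =>
    by_cases hm : t.drop (j+1) ∈ pvPossAlts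
    · rw [pvTryJ_hit hm] at h
      simp only [Option.some.injEq, Prod.mk.injEq] at h
      obtain ⟨rfl, rfl⟩ := h
      exact ⟨pv_take_all hj, List.take_append_drop _ _, Or.inl hm⟩
    · by_cases hn : t.drop (j+1) = []
      · rw [pvTryJ_nil hn] at h
        simp only [Option.some.injEq, Prod.mk.injEq] at h
        obtain ⟨rfl, rfl⟩ := h
        refine ⟨pv_take_all hj, ?_, Or.inr rfl⟩
        rw [List.append_nil]
        exact List.take_of_length_le (List.drop_eq_nil_iff.mp hn)
      · rw [pvTryJ_step hm hn] at h
        exact ih (Nat.le_of_succ_le hj) h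

theorem pv_takeWhile_append {Q l : List Char} (hQ : Q.all pvP) :
    (Q ++ l).takeWhile pvP = Q ++ l.takeWhile pvP := by
  have htwQ : Q.takeWhile pvP = Q :=
    List.takeWhile_eq_self_iff.mpr (fun a ha => List.all_eq_true.mp hQ a ha)
  rw [List.takeWhile_append, htwQ, if_pos rfl]

-- success when the tail is a punctuation run followed by a possessive
theorem pvTailM_poss {Q p : List Char} (hQ : Q.all pvP) (hp : p ∈ pvPossAlts) :
    pvTailM (Q ++ p) = some (Q, p) := by
  have hdropQ : (Q ++ p).drop Q.length = p := List.drop_left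
  have htakeQ : (Q ++ p).take Q.length = Q := List.take_left
  unfold pvTailM
  rw [pvP_def, pv_takeWhile_append hQ]
  simp only [pvPossAlts, List.mem_cons, List.not_mem_nil, or_false] at hp
  rcases hp with rfl | rfl | rfl
  · -- "'s": the apostrophe also counts as punctuation, one backtrack step
    have htw : List.takeWhile pvP "'s".toList = ['\''] := by decide
    rw [htw, show (Q ++ ['\'']).length = Q.length + 1 from by simp]
    have hm' : (Q ++ "'s".toList).drop Q.length ∈ pvPossAlts := by rw [hdropQ]; decide
    have hbad : ∀ i, Q.length < i → i ≤ Q.length + 1 →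
        (Q ++ "'s".toList).drop i ∉ pvPossAlts ∧ (Q ++ "'s".toList).drop i ≠ [] := by
      intro i hi1 hi2
      have hieq : i = Q.length + 1 := by omega
      subst hieq
      have hd : (Q ++ "'s".toList).drop (Q.length + 1) = ['s'] := by
        rw [List.drop_length_add_append]; decide
      rw [hd]
      exact ⟨by decide, by decide⟩
    rw [pvTryJ_between hm' (Q.length + 1) (by omega) hbad, hdropQ, htakeQ]
  · -- "’s": the right single quote is not in the punctuation class
    have htw : List.takeWhile pvP "’s".toList = [] := by decide
    rw [htw, List.append_nil]
    have hm' : (Q ++ "’s".toList).drop Q.length ∈ pvPossAlts := by rw [hdropQ]; decide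
    rw [pvTryJ_hit hm', hdropQ, htakeQ]
  · -- "s'": s is not punctuation
    have htw : List.takeWhile pvP "s'".toList = [] := by decide
    rw [htw, List.append_nil]
    have hm' : (Q ++ "s'".toList).drop Q.length ∈ pvPossAlts := by rw [hdropQ]; decide
    rw [pvTryJ_hit hm', hdropQ, htakeQ]

-- success when the whole tail is punctuation
theorem pvTailM_all {t : List Char} (h : t.all pvP) : pvTailM t = some (t, []) := by
  unfold pvTailM
  rw [pvP_def, List.takeWhile_eq_self_iff.mpr (fun a ha => List.all_eq_true.mp h a ha)]
  rw [pvTryJ_nil (List.drop_length), List.take_length]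

-- failure otherwise
theorem pvTailM_none {t : List Char} (h1 : ¬ t.all pvP)
    (h2 : ¬ (t.drop (t.length - 2) ∈ pvPossAlts ∧ (t.take (t.length - 2)).all pvP)) :
    pvTailM t = none := by
  cases hres : pvTailM t with
  | none => rfl
  | some r =>
    obtain ⟨q, p⟩ := r
    unfold pvTailM at hres
    obtain ⟨hq, hqp, hp⟩ := pvTryJ_succ_shape (le_refl _) hres
    rcases hp with hp | rfl
    · have hplen := pvPossAlts_len hp
      subst hqp
      have hl : (q ++ p).length - 2 = q.length := by simp [hplen]
      rw [hl, List.drop_left, List.take_left] at h2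
      exact absurd ⟨hp, hq⟩ h2
    · rw [List.append_nil] at hqp
      exact absurd (hqp ▸ hq) h1

-- the lazy scan computes A's split
theorem pvScan_spec (w : List Char) :
    pvScan w = (pvPunctSfx (w.take (w.length - (pvSpecPoss w).length)), pvSpecPoss w) := by
  induction w with
  | nil => decide
  | cons c rest ih =>
    by_cases hm : (c :: rest).drop ((c :: rest).length - 2) ∈ pvPossAlts
    · -- the word ends with a possessive marker
      have h2 : 2 ≤ (c :: rest).length := by
        by_contra hlt
        have := pvPossAlts_len hm
        rw [List.length_drop] at this
        omega
      have hspec : pvSpecPoss (c :: rest) = (c :: rest).drop ((c :: rest).length - 2) := by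
        unfold pvSpecPoss; rw [if_pos hm]
      have hlen2 : (pvSpecPoss (c :: rest)).length = 2 := by rw [hspec]; exact pvPossAlts_len hm
      by_cases hQ : ((c :: rest).take ((c :: rest).length - 2)).all pvP
      · -- whole tail matches: Q ++ p
        have hsplit : (c :: rest) = (c :: rest).take ((c :: rest).length - 2) ++ (c :: rest).drop ((c :: rest).length - 2) :=
          (List.take_append_drop _ _).symm
        have hTM := pvTailM_poss hQ hm
        rw [← hsplit] at hTM
        simp only [pvScan, hTM]
        rw [hlen2, hspec, pvPunctSfx_all hQ]
      · -- backtrack one char of the lazy group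
        have hna : ¬ (c :: rest).all pvP := fun hall =>
          hQ (List.all_eq_true.mpr fun a ha => List.all_eq_true.mp hall a (List.mem_of_mem_take ha))
        have hnone : pvTailM (c :: rest) = none := pvTailM_none hna (fun h => hQ h.2)
        have h3 : 3 ≤ (c :: rest).length := by
          by_contra hlt
          apply hQ
          have hl : (c :: rest).length - 2 = 0 := by
            simp only [List.length_cons] at h2 hlt ⊢; omega
          rw [hl]; simp
        have hrest2 : 2 ≤ rest.length := by simp only [List.length_cons] at h3; omega
        have harith : (c :: rest).length - 2 = (rest.length - 2) + 1 := by
          simp only [List.length_cons]; omega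
        have hdropeq : rest.drop (rest.length - 2) = (c :: rest).drop ((c :: rest).length - 2) := by
          rw [harith, List.drop_succ_cons]
        have htakeeq : (c :: rest).take ((c :: rest).length - 2) = c :: rest.take (rest.length - 2) := by
          rw [harith, List.take_succ_cons]
        have hspec' : pvSpecPoss rest = pvSpecPoss (c :: rest) := by
          unfold pvSpecPoss; rw [hdropeq]
        have hlen2' : (pvSpecPoss rest).length = 2 := by rw [hspec']; exact hlen2
        have hps : pvPunctSfx ((c :: rest).take ((c :: rest).length - 2)) = pvPunctSfx (rest.take (rest.length - 2)) := by
          rw [htakeeq, pvPunctSfx_tail (by rw [htakeeq] at hQ; exact hQ), List.tail_cons]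
        simp only [pvScan, hnone]
        rw [ih, hlen2', hlen2, ← hspec', hps]
    · -- no possessive marker
      have hspec : pvSpecPoss (c :: rest) = [] := by unfold pvSpecPoss; rw [if_neg hm]
      by_cases hall : (c :: rest).all pvP
      · simp only [pvScan, pvTailM_all hall]
        rw [hspec]
        simp [pvPunctSfx_all hall]
      · have hnone : pvTailM (c :: rest) = none := pvTailM_none hall (fun h => hm h.1)
        have hspec' : pvSpecPoss rest = [] := by
          unfold pvSpecPoss
          rw [if_neg]
          intro hmm
          by_cases hr2 : 2 ≤ rest.length
          · apply hm
            rwa [show (c :: rest).length - 2 = (rest.length - 2) + 1 from by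
                simp only [List.length_cons]; omega,
              List.drop_succ_cons]
          · have := pvPossAlts_len hmm
            rw [List.length_drop] at this
            omega
        simp only [pvScan, hnone]
        rw [ih, hspec, hspec']
        simp only [List.length_nil, Nat.sub_zero, List.take_length]
        rw [pvPunctSfx_tail hall, List.tail_cons]

-- per-word equality of the two ports' suffix computations
theorem pvSuffix_eq (w : List Char) : pvSuffixA w = (pvScan w).2 ++ (pvScan w).1 := by
  rw [pvScan_spec, pvSuffixA_spec]

-- ===== VERDICT (by name: the statement is the Claim_ definition above) =====
theorem apply_correction_preserving_punctuation_spec : Claim_equal_apply_correction_preserving_punctuation := by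
  intro wl pos cv _ _
  unfold Spec_apply_correction_preserving_punctuation
  unfold apply_correction_preserving_punctuation apply_correction_preserving_punctuation_alt
  split
  · rfl
  · cases h : PySem.List.pyGet? wl pos with
    | none => rfl
    | some word => simp [pvSuffix_eq, List.append_assoc]
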